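-- pv_equiv track=rewrite | github.com/MisterNicoLarson/NLP-and-Murder- | scriptsWkw/WhoKillWho5.py | deduction2
-- ===== SOURCE A (Python) =====
-- def deduction2(doc1,doc2):
--     result = []
--     for raw1 in doc1:
--         flag = True
--         for raw2 in doc2:
--             if raw1[0] == raw2[0]:
--                 flag = False
--                 stock = ( raw1[0], raw1[1] , raw2[1] )
--                 result.append(stock)
--         if flag:
--             stock = ( raw1[0], raw1[1] , "" )
--             result.append(stock)
--
--     return result
-- ===== SOURCE B (Python) =====
-- def deduction2(doc1, doc2):
--     index = {}
--     for k, v in doc2: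
--         index.setdefault(k, []).append(v)
--     result = []
--     for k, v in doc1:
--         matches = index.get(k, [])
--         if matches:
--             for v2 in matches:
--                 result.append((k, v, v2))
--         else:
--             result.append((k, v, ""))
--     return result
-- ===== Notes on version B (the rewrite author's own statement) =====
-- stated objective: alternative
-- what changed: Replaced the nested scan of doc2 for every doc1 row by a dict of value-lists built once from doc2, so each doc1 row does a single lookup instead of an inner scan.
import Mathlib
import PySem

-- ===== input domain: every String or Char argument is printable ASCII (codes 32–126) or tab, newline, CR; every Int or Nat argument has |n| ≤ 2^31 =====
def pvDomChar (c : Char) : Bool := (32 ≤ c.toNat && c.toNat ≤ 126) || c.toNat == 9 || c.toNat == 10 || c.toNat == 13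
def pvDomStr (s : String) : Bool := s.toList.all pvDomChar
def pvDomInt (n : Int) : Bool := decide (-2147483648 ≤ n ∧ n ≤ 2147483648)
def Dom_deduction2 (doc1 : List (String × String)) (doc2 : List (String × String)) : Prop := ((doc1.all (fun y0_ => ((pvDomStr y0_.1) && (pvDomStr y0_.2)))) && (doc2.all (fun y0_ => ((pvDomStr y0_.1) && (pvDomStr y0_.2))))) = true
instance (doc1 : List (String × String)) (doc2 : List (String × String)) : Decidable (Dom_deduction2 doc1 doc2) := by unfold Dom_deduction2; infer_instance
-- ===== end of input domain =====

-- B replaces A's nested scan of doc2 per doc1 row by a dict of value-lists built once from doc2 (alternative structure; one lookup per doc1 row).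

-- ===== PORT A =====
-- nested loops: for each raw1 scan all of doc2, flag tracks "no match yet"
def deduction2 (doc1 : List (String × String)) (doc2 : List (String × String)) : List (String × String × String) :=
  doc1.foldl (fun result raw1 =>
    let p := doc2.foldl
      (fun (st : List (String × String × String) × Bool) raw2 =>
        if raw1.1 == raw2.1 then (st.1 ++ [(raw1.1, raw1.2, raw2.2)], false) else st)
      (result, true)
    if p.2 then p.1 ++ [(raw1.1, raw1.2, "")] else p.1) []

-- ===== PORT B =====
-- index.setdefault(k, []).append(v) over doc2
def dedIndex (doc2 : List (String × String)) : PySem.Dict String (List String) :=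
  doc2.foldl (fun d kv => d.insert kv.1 (d.getD kv.1 [] ++ [kv.2])) PySem.Dict.empty

def deduction2_alt (doc1 : List (String × String)) (doc2 : List (String × String)) : List (String × String × String) :=
  let idx := dedIndex doc2
  doc1.foldl (fun result kv =>
    let ms := idx.getD kv.1 []
    if ms.isEmpty then result ++ [(kv.1, kv.2, "")]
    else result ++ ms.map (fun v2 => (kv.1, kv.2, v2))) []

-- ===== PRECONDITION & SPEC =====
def Spec_deduction2 (doc1 : List (String × String)) (doc2 : List (String × String)) (out : List (String × String × String)) : Prop := out = deduction2_alt doc1 doc2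
instance (doc1 : List (String × String)) (doc2 : List (String × String)) (out : List (String × String × String)) : Decidable (Spec_deduction2 doc1 doc2 out) := by unfold Spec_deduction2; infer_instance

-- ===== CLAIM (what is proved, stated in full; the proofs are below) =====
def Claim_equal_deduction2 : Prop := ∀ (doc1 : List (String × String)) (doc2 : List (String × String)), Dom_deduction2 doc1 doc2 → Spec_deduction2 doc1 doc2 (deduction2 doc1 doc2)

-- ===== LEMMAS AND PROOFS =====

-- the index's list for key k is exactly the doc2 values whose key equals k, in order
theorem dedIndex_getD (doc2 : List (String × String)) (k : String) :
    (dedIndex doc2).getD k [] = ((doc2.filter (fun p => p.1 == k)).map Prod.snd) := by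
  unfold dedIndex
  suffices h : ∀ (l : List (String × String)) (d : PySem.Dict String (List String)),
      (l.foldl (fun d kv => d.insert kv.1 (d.getD kv.1 [] ++ [kv.2])) d).getD k []
        = d.getD k [] ++ ((l.filter (fun p => p.1 == k)).map Prod.snd) by
    simpa using h doc2 PySem.Dict.empty
  intro l
  induction l with
  | nil => intro d; simp
  | cons kv t ih =>
    intro d
    by_cases h : kv.1 = k
    · subst h
      simp [List.foldl_cons, ih]
    · have hb : (kv.1 == k) = false := by simpa using h
      simp [List.foldl_cons, ih, PySem.Dict.getD_insert, hb, Ne.symm h]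

-- A's inner loop over doc2 from state (res, b): it appends the matching rows
-- in order and the flag records "matched nothing" (conjoined with b)
theorem inner_loop (k v : String) (doc2 : List (String × String)) :
    ∀ (res : List (String × String × String)) (b : Bool),
      doc2.foldl
        (fun (st : List (String × String × String) × Bool) raw2 =>
          if k == raw2.1 then (st.1 ++ [(k, v, raw2.2)], false) else st) (res, b)
      = (res ++ (doc2.filter (fun p => p.1 == k)).map (fun p => (k, v, p.2)),
         b && (doc2.filter (fun p => p.1 == k)).isEmpty) := by
  induction doc2 with
  | nil => intro res b; simp
  | cons kv2 t ih =>
    intro res b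
    simp only [List.foldl_cons, List.filter_cons]
    by_cases h : k = kv2.1
    · have hb : (k == kv2.1) = true := by simpa using h
      have hb2 : (kv2.1 == k) = true := by simpa using h.symm
      rw [if_pos hb, ih, hb2]
      simp
    · have hb : (k == kv2.1) = false := by simpa using h
      have hb2 : (kv2.1 == k) = false := by simpa using Ne.symm h
      rw [if_neg (by simp [hb]), ih, hb2]
      simp

theorem deduction2_spec : Claim_equal_deduction2 := by
  intro doc1 doc2 hd
  clear hd
  unfold Spec_deduction2 deduction2 deduction2_alt
  suffices h : ∀ (acc : List (String × String × String)),
      doc1.foldl (fun result raw1 =>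
        let p := doc2.foldl
          (fun (st : List (String × String × String) × Bool) raw2 =>
            if raw1.1 == raw2.1 then (st.1 ++ [(raw1.1, raw1.2, raw2.2)], false) else st)
          (result, true)
        if p.2 then p.1 ++ [(raw1.1, raw1.2, "")] else p.1) acc
      = doc1.foldl (fun result kv =>
          let ms := (dedIndex doc2).getD kv.1 []
          if ms.isEmpty then result ++ [(kv.1, kv.2, "")]
          else result ++ ms.map (fun v2 => (kv.1, kv.2, v2))) acc by
    simpa using h []
  induction doc1 with
  | nil => intro acc; rfl
  | cons kv t ih =>
    intro acc
    simp only [List.foldl_cons]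
    rw [inner_loop kv.1 kv.2 doc2 acc true, dedIndex_getD doc2 kv.1]
    by_cases he : (doc2.filter (fun p => p.1 == kv.1)) = []
    · simp only [he, List.map_nil, List.append_nil, List.isEmpty_nil, Bool.true_and, if_true]
      exact ih _
    · have h1 : (doc2.filter (fun p => p.1 == kv.1)).isEmpty = false := by
        simpa [List.isEmpty_iff] using he
      have h2 : ((doc2.filter (fun p => p.1 == kv.1)).map Prod.snd).isEmpty = false := by
        simp [he]
      simp only [h1, Bool.true_and, Bool.false_eq_true, if_false, h2, List.map_map]
      exact ih _
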